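-- pv_equiv track=rewrite | github.com/foxzool/open-lark | tools/export_server_api_list.py | normalize_support_app_types
-- ===== SOURCE A (Python) =====
-- from typing import Any, Dict, Iterable, List, Optional, Tuple
--
-- def normalize_support_app_types(types: Iterable[str]) -> List[str]:
--     seen = set()
--     cleaned: List[str] = []
--     for t in types:
--         if not t:
--             continue
--         v = str(t).strip().lower()
--         if not v or v in seen:
--             continue
--         seen.add(v)
--         cleaned.append(v)
--
--     priority = {"isv": 0, "custom": 1}
--     return sorted(cleaned, key=lambda x: (priority.get(x, 99), x))
-- ===== SOURCE B (Python) =====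
-- def normalize_support_app_types(types):
--     norm = set()
--     for t in types:
--         if t:
--             v = str(t).strip().lower()
--             if v:
--                 norm.add(v)
--     head = [k for k in ("isv", "custom") if k in norm]
--     rest = sorted(v for v in norm if v not in ("isv", "custom"))
--     return head + rest
-- ===== Notes on version B (the rewrite author's own statement) =====
-- stated objective: alternative
-- what changed: Replaces the dedup-list-plus-comparator-key sort (sorted with a (priority,x) tuple key over an order-preserving dedup) by priority bucketing: build the set of normalized values, emit 'isv' then 'custom' by membership, and plain-sort only the remaining bucket.
import Mathlib
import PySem

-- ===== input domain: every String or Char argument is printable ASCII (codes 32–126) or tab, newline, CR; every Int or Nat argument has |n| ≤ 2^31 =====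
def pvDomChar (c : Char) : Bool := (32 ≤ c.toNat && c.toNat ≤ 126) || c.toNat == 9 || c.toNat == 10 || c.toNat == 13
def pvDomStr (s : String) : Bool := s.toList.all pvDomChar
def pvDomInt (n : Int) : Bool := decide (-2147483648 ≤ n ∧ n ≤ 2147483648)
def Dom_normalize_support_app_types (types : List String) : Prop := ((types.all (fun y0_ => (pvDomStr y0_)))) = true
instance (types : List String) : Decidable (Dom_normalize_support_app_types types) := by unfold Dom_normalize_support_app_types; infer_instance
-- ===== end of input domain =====

-- B replaces A's comparator-key sort over an order-preserving dedup by priority bucketing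
-- ('isv' / 'custom' by membership, plain sort of the rest); alternative decomposition, same cost.

-- ===== PORT A =====
def pvPriority : PySem.Dict String Int := PySem.Dict.ofList [("isv", 0), ("custom", 1)]

-- one loop iteration of A: skip falsy t, normalize, skip empty/seen, else record in (seen, cleaned)
def pvAStep (st : PySem.Set String × List String) (t : String) : PySem.Set String × List String :=
  if t = "" then st
  else
    let v := PySem.Str.lower (PySem.Str.strip t)
    if v = "" ∨ PySem.Set.contains st.1 v then st
    else (PySem.Set.add st.1 v, st.2 ++ [v])

def normalize_support_app_types (types : List String) : List String :=
  let st := types.foldl pvAStep (PySem.Set.empty, [])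
  PySem.List.sorted2 st.2 (fun x => pvPriority.getD x 99) (fun x => x) false

-- ===== PORT B =====
-- one loop iteration of B: add the normalized value to the set unless t or it is empty
def pvBStep (s : PySem.Set String) (t : String) : PySem.Set String :=
  if t ≠ "" then
    let v := PySem.Str.lower (PySem.Str.strip t)
    if v ≠ "" then PySem.Set.add s v else s
  else s

def normalize_support_app_types_alt (types : List String) : List String :=
  let norm := types.foldl pvBStep PySem.Set.empty
  let head := ["isv", "custom"].filter (fun k => PySem.Set.contains norm k)
  let rest := PySem.List.sorted (norm.filter (fun v => !(v == "isv" || v == "custom"))) (fun x => x) false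
  head ++ rest

-- ===== PRECONDITION & SPEC =====
def Spec_normalize_support_app_types (types : List String) (out : List String) : Prop := out = normalize_support_app_types_alt types
instance (types : List String) (out : List String) : Decidable (Spec_normalize_support_app_types types out) := by unfold Spec_normalize_support_app_types; infer_instance

-- ===== CLAIM (what is proved, stated in full; the proofs are below) =====
def Claim_equal_normalize_support_app_types : Prop := ∀ (types : List String), Dom_normalize_support_app_types types → Spec_normalize_support_app_types types (normalize_support_app_types types)

-- ===== LEMMAS AND PROOFS =====

-- A's fold keeps seen = cleaned, and both equal B's set fold
theorem pv_fold_sync (ts : List String) (s : PySem.Set String) :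
    ts.foldl pvAStep (s, s) = (ts.foldl pvBStep s, ts.foldl pvBStep s) := by
  induction ts generalizing s with
  | nil => rfl
  | cons t ts ih =>
    simp only [List.foldl_cons]
    have hstep : pvAStep (s, s) t = (pvBStep s t, pvBStep s t) := by
      unfold pvAStep pvBStep
      rcases eq_or_ne t "" with ht | ht
      · rw [if_pos ht, if_neg (by simp [ht])]
      · rw [if_neg ht, if_pos ht]
        simp only []
        rcases eq_or_ne (PySem.Str.lower (PySem.Str.strip t)) "" with hv | hv
        · rw [if_pos (Or.inl hv), if_neg (by simp [hv])]
        · rw [if_pos hv]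
          by_cases hc : PySem.Set.contains s (PySem.Str.lower (PySem.Str.strip t))
          · rw [if_pos (Or.inr hc)]
            unfold PySem.Set.add
            rw [if_pos hc]
          · rw [if_neg (by rw [not_or]; exact ⟨hv, hc⟩)]
            unfold PySem.Set.add
            rw [if_neg hc]
    rw [hstep, ih]

theorem pv_add_nodup (s : PySem.Set String) (x : String) (hs : s.Nodup) :
    (PySem.Set.add s x).Nodup := by
  unfold PySem.Set.add
  by_cases hc : PySem.Set.contains s x
  · rw [if_pos hc]; exact hs
  · rw [if_neg hc]
    have hx : x ∉ s := by
      simpa [PySem.Set.contains, List.contains_eq_mem] using hc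
    rw [List.nodup_append]
    refine ⟨hs, List.nodup_singleton x, ?_⟩
    intro a ha b hb
    rw [List.mem_singleton] at hb
    subst hb
    exact fun h => hx (h ▸ ha)

theorem pv_bfold_nodup (ts : List String) (s : PySem.Set String) (hs : s.Nodup) :
    (ts.foldl pvBStep s).Nodup := by
  induction ts generalizing s with
  | nil => exact hs
  | cons t ts ih =>
    apply ih
    unfold pvBStep
    rcases eq_or_ne t "" with h1 | h1
    · rw [if_neg (by simp [h1])]; exact hs
    · rw [if_pos h1]
      simp only []
      rcases eq_or_ne (PySem.Str.lower (PySem.Str.strip t)) "" with h2 | h2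
      · rw [if_neg (by simp [h2])]; exact hs
      · rw [if_pos h2]
        exact pv_add_nodup _ _ hs

-- the priority key of A, written with the lexicographic product order
def pvKey (x : String) : Lex (Int × String) :=
  toLex ((pvPriority.getD x 99), x)

theorem pv_k1_other (x : String) (h1 : x ≠ "isv") (h2 : x ≠ "custom") :
    pvPriority.getD x 99 = 99 := by
  have hd : pvPriority = PySem.Dict.mk [("isv", 0), ("custom", 1)] := by decide
  simp [hd, PySem.Dict.getD, PySem.Dict.get?, Ne.symm h1, Ne.symm h2]

theorem pv_before_eq (k1 : String → Int) (a b : String) :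
    (decide (k1 a < k1 b) || (!decide (k1 b < k1 a) && decide (a < b)))
      = decide (toLex (k1 a, a) < toLex (k1 b, b)) := by
  have hiff : (toLex (k1 a, a) < toLex (k1 b, b)) ↔ (k1 a < k1 b ∨ k1 a = k1 b ∧ a < b) := by
    rw [Prod.Lex.lt_iff]; simp only [ofLex_toLex]
  by_cases h1 : k1 a < k1 b <;> by_cases h2 : k1 b < k1 a <;> by_cases h3 : a < b <;>
    simp [h1, h2, h3, hiff] <;> omega

-- A's sorted2 with tuple key (priority, x) is sorted with the lexicographic key pvKey
theorem pv_sorted2_eq (xs : List String) :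
    PySem.List.sorted2 xs (fun x => pvPriority.getD x 99) (fun x => x) false
      = PySem.List.sorted xs pvKey false := by
  rw [PySem.List.sorted_eq_foldl_insertBy]
  show List.foldl (fun acc x => PySem.List.insertBy
      (fun a b => decide (pvPriority.getD a 99 < pvPriority.getD b 99)
        || (!decide (pvPriority.getD b 99 < pvPriority.getD a 99) && decide (a < b))) x acc) [] xs
    = List.foldl (fun acc x => PySem.List.insertBy
      (fun a b => decide (pvKey a < pvKey b)) x acc) [] xs
  congr 1
  funext acc x
  congr 1
  funext a b
  exact pv_before_eq (fun x => pvPriority.getD x 99) a b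

-- main lemma: for any nodup list S, A's sort of S equals B's bucketed output
theorem pv_main (S : List String) (hS : S.Nodup) :
    PySem.List.sorted2 S (fun x => pvPriority.getD x 99)
      (fun x => x) false
      = (["isv", "custom"].filter (fun k => PySem.Set.contains S k))
        ++ PySem.List.sorted (S.filter (fun v => !(v == "isv" || v == "custom"))) (fun x => x) false := by
  rw [pv_sorted2_eq]
  set p : String → Bool := fun v => (v == "isv" || v == "custom") with hp
  set head := ["isv", "custom"].filter (fun k => PySem.Set.contains S k) with hhead
  set rest := PySem.List.sorted (S.filter (fun v => !p v)) (fun x => x) false with hrest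
  have hmem_head : ∀ x, x ∈ head ↔ (x = "isv" ∨ x = "custom") ∧ x ∈ S := by
    intro x
    simp [hhead, List.mem_filter, PySem.Set.contains, List.contains_eq_mem, or_comm]
    try tauto
  have hmem_rest : ∀ x, x ∈ rest ↔ x ∈ S ∧ ¬(x = "isv" ∨ x = "custom") := by
    intro x
    rw [hrest, PySem.List.mem_sorted]
    simp [List.mem_filter, hp]
  have hnodup_head : head.Nodup := List.Nodup.filter _ (by decide)
  have hnodup_restsrc : (S.filter (fun v => !p v)).Nodup := List.Nodup.filter _ hS
  have hnodup_rest : rest.Nodup :=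
    ((PySem.List.sorted_perm _ _ _).nodup_iff).mpr hnodup_restsrc
  apply PySem.List.sorted_eq_of_perm_of_pairwise_lt
  · -- permutation
    have p1 : (head ++ rest).Perm (S.filter p ++ S.filter (fun v => !p v)) := by
      apply List.Perm.append
      · rw [List.perm_ext_iff_of_nodup hnodup_head (List.Nodup.filter _ hS)]
        intro a
        rw [hmem_head]
        simp only [List.mem_filter, hp]
        constructor
        · rintro ⟨h, hmem⟩
          refine ⟨hmem, ?_⟩
          rcases h with h | h <;> simp [h]
        · rintro ⟨hmem, h⟩
          simp only [Bool.or_eq_true, beq_iff_eq] at h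
          exact ⟨h, hmem⟩
      · exact PySem.List.sorted_perm _ _ _
    exact p1.trans (List.filter_append_perm p S)
  · -- pairwise strict key order
    rw [List.pairwise_append]
    refine ⟨?_, ?_, ?_⟩
    · -- head
      have hpw : List.Pairwise (fun a b => pvKey a < pvKey b) ["isv", "custom"] := by
        refine List.Pairwise.cons ?_ (List.Pairwise.cons (by simp) List.Pairwise.nil)
        intro b hb
        rw [List.mem_singleton] at hb
        subst hb
        rw [pvKey, pvKey, Prod.Lex.lt_iff]
        simp only [ofLex_toLex]
        left
        decide
      exact List.Pairwise.sublist List.filter_sublist hpw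
    · -- rest
      have hle : List.Pairwise (fun a b : String => a ≤ b) rest :=
        PySem.List.sorted_pairwise _ _
      have hlt : List.Pairwise (fun a b : String => a < b) rest := by
        have := List.Pairwise.and hle hnodup_rest
        exact this.imp (fun ⟨h1, h2⟩ => lt_of_le_of_ne h1 h2)
      refine hlt.imp_of_mem ?_
      intro a b ha hb hab
      have ha' := (hmem_rest a).mp ha
      have hb' := (hmem_rest b).mp hb
      rw [pvKey, pvKey, pv_k1_other a (fun h => ha'.2 (Or.inl h)) (fun h => ha'.2 (Or.inr h)),
        pv_k1_other b (fun h => hb'.2 (Or.inl h)) (fun h => hb'.2 (Or.inr h)),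
        Prod.Lex.lt_iff]
      simp only [ofLex_toLex]
      exact Or.inr ⟨by simp, hab⟩
    · -- cross
      intro a ha b hb
      have ha' := (hmem_head a).mp ha
      have hb' := (hmem_rest b).mp hb
      rw [pvKey, pvKey, pv_k1_other b (fun h => hb'.2 (Or.inl h)) (fun h => hb'.2 (Or.inr h)),
        Prod.Lex.lt_iff]
      simp only [ofLex_toLex]
      left
      rcases ha'.1 with h | h <;> subst h <;> decide

-- ===== VERDICT (by name: the statement is the Claim_ definition above) =====
theorem normalize_support_app_types_spec : Claim_equal_normalize_support_app_types := by
  intro types _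
  unfold Spec_normalize_support_app_types normalize_support_app_types normalize_support_app_types_alt
  rw [show (PySem.Set.empty, ([] : List String)) = ((PySem.Set.empty : PySem.Set String), (PySem.Set.empty : PySem.Set String)) from rfl,
    pv_fold_sync]
  exact pv_main _ (pv_bfold_nodup types PySem.Set.empty List.nodup_nil)
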